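-- pv_equiv track=rewrite | github.com/CarlosTadeuVassoler/MPinch | ideia.py | criar_incidencia
-- ===== SOURCE A (Python) =====
-- nhot = 4
--
-- ncold = 5
--
-- def criar_incidencia(matriz_nova):
-- 	incidencia = []
-- 	for i in range(nhot + ncold):
-- 		incidencia.append([])
--
-- 	for i in range(nhot):
-- 		for trocador in matriz_nova:
-- 			if trocador[0] == i:
-- 				incidencia[i].append(1)
-- 			else:
-- 				incidencia[i].append(0)
--
-- 	for j in range(nhot, ncold + nhot):
-- 		for trocador in matriz_nova:
-- 			if trocador[1] == j:
-- 				incidencia[j].append(-1)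
-- 			else:
-- 				incidencia[j].append(0)
--
-- 	return incidencia
-- ===== SOURCE B (Python) =====
-- nhot = 4
--
-- ncold = 5
--
-- def criar_incidencia(matriz_nova):
--     # Different algorithm: compute each exchanger's 9-entry COLUMN vector once,
--     # then transpose the list of columns with zip(*...) to obtain the rows.
--     cols = [[int(t[0] == i) for i in range(nhot)]
--             + [-int(t[1] == j) for j in range(nhot, nhot + ncold)]
--             for t in matriz_nova]
--     if not cols:
--         return [[] for _ in range(nhot + ncold)]
--     return [list(r) for r in zip(*cols)]
-- ===== Notes on version B (the rewrite author's own statement) =====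
-- stated objective: alternative
-- what changed: B computes each exchanger's 9-entry column vector once and then transposes the list of columns with zip(*cols) to get the rows, instead of A's row-by-row construction that rescans the exchanger list once per row.
import Mathlib
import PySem

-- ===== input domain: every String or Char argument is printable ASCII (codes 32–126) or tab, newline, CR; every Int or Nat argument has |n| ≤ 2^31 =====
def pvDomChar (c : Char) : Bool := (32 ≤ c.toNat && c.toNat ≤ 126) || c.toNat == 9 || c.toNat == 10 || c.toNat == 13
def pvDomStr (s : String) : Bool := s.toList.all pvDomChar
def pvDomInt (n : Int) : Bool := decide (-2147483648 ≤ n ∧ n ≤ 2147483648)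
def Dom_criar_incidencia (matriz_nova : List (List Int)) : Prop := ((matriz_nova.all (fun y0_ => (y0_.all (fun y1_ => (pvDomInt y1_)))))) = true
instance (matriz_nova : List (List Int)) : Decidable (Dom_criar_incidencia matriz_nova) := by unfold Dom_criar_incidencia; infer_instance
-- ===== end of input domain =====

-- B builds each exchanger's 9-entry column vector once and transposes the column list
-- (zip(*cols)) to obtain the rows; A builds the matrix row-by-row, rescanning the
-- exchanger list once per row. Equivalence is about the return value only.

-- ===== PORT A =====
-- Row-by-row: start with 9 empty rows, then for each row index rescan matriz_nova and append.
def criar_incidencia (matriz_nova : List (List Int)) : List (List Int) :=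
  let incidencia : List (List Int) :=
    (PySem.List.pyRange 0 (4 + 5) 1).foldl (fun acc _ => acc ++ [[]]) []
  let incidencia :=
    (PySem.List.pyRange 0 4 1).foldl (fun acc i =>
      matriz_nova.foldl (fun acc2 trocador =>
        acc2.modify i.toNat (fun row =>
          row ++ [if PySem.List.pyGet? trocador 0 = some i then (1 : Int) else 0])) acc) incidencia
  let incidencia :=
    (PySem.List.pyRange 4 (5 + 4) 1).foldl (fun acc j =>
      matriz_nova.foldl (fun acc2 trocador =>
        acc2.modify j.toNat (fun row =>
          row ++ [if PySem.List.pyGet? trocador 1 = some j then (-1 : Int) else 0])) acc) incidencia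
  incidencia

-- ===== PORT B =====
-- the column vector of one exchanger (Source B's inner comprehension)
def pvCol (t : List Int) : List Int :=
  (PySem.List.pyRange 0 4 1).map (fun i => if PySem.List.pyGet? t 0 = some i then (1 : Int) else 0)
  ++ (PySem.List.pyRange 4 (4 + 5) 1).map (fun j => -(if PySem.List.pyGet? t 1 = some j then (1 : Int) else 0))

-- Python's zip(*cols): repeatedly take the heads of all columns until some column is exhausted
def pvZipStar (cols : List (List Int)) : List (List Int) :=
  match cols with
  | [] => []
  | c :: rest =>
    if (c :: rest).any (fun l => l.isEmpty) then []
    else ((c :: rest).map (fun l => l.headD 0)) :: pvZipStar ((c :: rest).map List.tail)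
termination_by (cols.headD []).length
decreasing_by
  simp only [List.any_cons, List.any_eq_true, Bool.or_eq_true, not_or] at *
  cases c with
  | nil => simp_all
  | cons x xs => simp

def criar_incidencia_alt (matriz_nova : List (List Int)) : List (List Int) :=
  let cols := matriz_nova.map pvCol
  if cols = [] then List.replicate (4 + 5) []
  else pvZipStar cols

-- ===== PRECONDITION & SPEC =====
-- Pre_: every exchanger row has at least two entries; on shorter rows Python's
-- trocador[0]/trocador[1] raises IndexError in both A and B.
def Pre_criar_incidencia (matriz_nova : List (List Int)) : Prop :=
  ∀ t ∈ matriz_nova, 2 ≤ t.length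
instance (matriz_nova : List (List Int)) : Decidable (Pre_criar_incidencia matriz_nova) := by
  unfold Pre_criar_incidencia; infer_instance
def pvWitness_criar_incidencia : List (List Int) := [[0, 4], [1, 5], [3, 8]]

def Spec_criar_incidencia (matriz_nova : List (List Int)) (out : List (List Int)) : Prop := out = criar_incidencia_alt matriz_nova
instance (matriz_nova : List (List Int)) (out : List (List Int)) : Decidable (Spec_criar_incidencia matriz_nova out) := by unfold Spec_criar_incidencia; infer_instance

-- ===== CLAIM (what is proved, stated in full; the proofs are below) =====
def Claim_equal_criar_incidencia : Prop := ∀ (matriz_nova : List (List Int)), Dom_criar_incidencia matriz_nova → Pre_criar_incidencia matriz_nova → Spec_criar_incidencia matriz_nova (criar_incidencia matriz_nova)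

-- ===== LEMMAS AND PROOFS =====

-- entry appended to hot row i / cold row j for exchanger t
def pvHot (i : Int) (t : List Int) : Int :=
  if PySem.List.pyGet? t 0 = some i then 1 else 0
def pvCold (j : Int) (t : List Int) : Int :=
  if PySem.List.pyGet? t 1 = some j then -1 else 0

lemma pv_neg_ite (c : Prop) [Decidable c] :
    (-(if c then (1 : Int) else 0)) = (if c then (-1 : Int) else 0) := by
  split <;> simp

-- folding a modify-at-a-fixed-index over a list = one modify with the whole inner fold
lemma foldl_modify_fixed {α : Type} (m : List α) (k : Nat)
    (g : List Int → α → List Int) (acc : List (List Int)) :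
    m.foldl (fun a t => a.modify k (fun r => g r t)) acc
      = acc.modify k (fun r => m.foldl g r) := by
  induction m generalizing acc with
  | nil =>
      refine (List.ext_getElem (by simp) ?_).symm
      simp [List.getElem_modify]
  | cons t ts ih =>
      simp only [List.foldl_cons, ih, List.modify_modify_eq]
      rfl

lemma foldl_append_f {α : Type} (m : List α) (f : α → Int) (r : List Int) :
    m.foldl (fun row t => row ++ [f t]) r = r ++ m.map f := by
  induction m generalizing r with
  | nil => simp
  | cons t ts ih => simp [ih]

-- closed form of both sides
def pvTarget (m : List (List Int)) : List (List Int) :=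
  [m.map (pvHot 0), m.map (pvHot 1), m.map (pvHot 2), m.map (pvHot 3),
   m.map (pvCold 4), m.map (pvCold 5), m.map (pvCold 6), m.map (pvCold 7), m.map (pvCold 8)]

lemma portA_eq_target (m : List (List Int)) : criar_incidencia m = pvTarget m := by
  have h9 : PySem.List.pyRange 0 (4 + 5) 1 = [0, 1, 2, 3, 4, 5, 6, 7, 8] := by decide
  have h4 : PySem.List.pyRange 0 4 1 = [0, 1, 2, 3] := by decide
  have h5 : PySem.List.pyRange 4 (5 + 4) 1 = [4, 5, 6, 7, 8] := by decide
  unfold criar_incidencia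
  simp only [h9, h4, h5, List.foldl_cons, List.foldl_nil]
  simp only [foldl_modify_fixed, foldl_append_f]
  simp [pvTarget, pvHot, pvCold, List.modify]

-- zip(*cols) on a nonempty list of equal-length columns: row k collects entry k of every column
lemma zipStar_uniform (n : Nat) : ∀ (cols : List (List Int)), cols ≠ [] →
    (∀ c ∈ cols, c.length = n) →
    pvZipStar cols = (List.range n).map (fun k => cols.map (fun c => c.getD k 0)) := by
  induction n with
  | zero =>
      intro cols hne hlen
      match cols with
      | [] => exact absurd rfl hne
      | c :: rest =>
          have hc : c.isEmpty = true := by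
            have := hlen c (by simp); simpa [List.isEmpty_iff, List.length_eq_zero_iff] using this
          unfold pvZipStar
          simp [hc]
  | succ n ih =>
      intro cols hne hlen
      match cols with
      | [] => exact absurd rfl hne
      | c :: rest =>
          have hnoempty : ((c :: rest).any (fun l => l.isEmpty)) = false := by
            simp only [List.any_eq_false]
            intro l hl
            have := hlen l hl
            simpa [List.isEmpty_iff, ← List.length_eq_zero_iff] using (by omega : l.length ≠ 0)
          have hlen' : ∀ c' ∈ (c :: rest).map List.tail, c'.length = n := by
            intro c' hc'
            rcases List.mem_map.mp hc' with ⟨d, hd, rfl⟩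
            have := hlen d hd
            simp [List.length_tail, this]
          have ihh := ih ((c :: rest).map List.tail) (by simp) hlen'
          unfold pvZipStar
          simp only [hnoempty, Bool.false_eq_true, if_false, ihh]
          rw [List.range_succ_eq_map]
          simp only [List.map_cons, List.map_map]
          have hcne : c ≠ [] := by
            have := hlen c (by simp); intro h; subst h; simp at this
          obtain ⟨x, xs, rfl⟩ := List.exists_cons_of_ne_nil hcne
          congr 1
          · congr 1
            apply List.map_congr_left
            intro d hd
            have hdlen := hlen d (by simp [hd])
            cases d with
            | nil => simp at hdlen
            | cons y ys => simp
          · apply List.map_congr_left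
            intro k hk
            simp only [Function.comp]
            congr 1
            apply List.map_congr_left
            intro d hd
            have hdlen := hlen d (by simp [hd])
            cases d with
            | nil => simp at hdlen
            | cons y ys => simp

lemma pvCol_len (t : List Int) : (pvCol t).length = 9 := by
  simp [pvCol]

lemma portB_eq_target (m : List (List Int)) : criar_incidencia_alt m = pvTarget m := by
  unfold criar_incidencia_alt
  cases m with
  | nil => simp [pvTarget, List.replicate]
  | cons t ts =>
      simp only [List.map_cons, if_neg (by simp : ¬ ((pvCol t :: ts.map pvCol) = []))]
      rw [← List.map_cons]
      rw [zipStar_uniform 9 ((t :: ts).map pvCol) (by simp)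
            (by intro c hc; rcases List.mem_map.mp hc with ⟨d, _, rfl⟩; exact pvCol_len d)]
      have hr : List.range 9 = [0, 1, 2, 3, 4, 5, 6, 7, 8] := by decide
      rw [hr]
      simp only [List.map_cons, List.map_nil, List.map_map, pvTarget]
      have h4 : PySem.List.pyRange 0 4 1 = [0, 1, 2, 3] := by decide
      simp only [List.cons.injEq]
      refine ⟨?_, ?_, ?_, ?_, ?_, ?_, ?_, ?_, ?_, trivial⟩ <;>
        exact ⟨by simp [pvCol, pvHot, pvCold, pv_neg_ite, h4],
               List.map_congr_left (fun d _ => by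
                 simp [Function.comp, pvCol, pvHot, pvCold, pv_neg_ite, h4])⟩

-- ===== VERDICT (by name: the statement is the Claim_ definition above) =====
theorem criar_incidencia_spec : Claim_equal_criar_incidencia := by
  intro m _ _
  unfold Spec_criar_incidencia
  rw [portA_eq_target, portB_eq_target]
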